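-- pv_equiv track=rewrite | github.com/posl/comment_recommendation | script/mod_gen/5_time/ja/246_C/1.py | get_min_price
-- ===== SOURCE A (Python) =====
-- def get_min_price(n, k, x, a):
--     a.sort()
--     price = 0
--     for i in range(n):
--         if k > 0:
--             price += max(a[i]-x, 0)
--             k -= 1
--         else:
--             price += a[i]
--     return price
-- ===== SOURCE B (Python) =====
-- def get_min_price(n, k, x, a):
--     a.sort()
--     # prefix[j] = sum of the j smallest prices
--     prefix = [0]
--     for v in a:
--         prefix.append(prefix[-1] + v)
--     m = min(k, n)
--     if m < 0:
--         m = 0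
--     # binary search for the first discounted index whose price exceeds x
--     # (valid because a is sorted): items before it cost 0 after the coupon
--     lo, hi = 0, m
--     while lo < hi:
--         mid = (lo + hi) // 2
--         if a[mid] <= x:
--             lo = mid + 1
--         else:
--             hi = mid
--     return prefix[n] - prefix[lo] - (m - lo) * x
-- ===== Notes on version B (the rewrite author's own statement) =====
-- stated objective: alternative
-- what changed: Replaces A's per-item loop (branching on a mutable remaining-discount counter) by a prefix-sum table plus a hand-written binary search over the sorted list for the first discounted item dearer than x, so the answer is computed as prefix[n] - prefix[lo] - (m - lo)*x with no per-item discount branch.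
-- outside the precondition, e.g. on get_min_price(-1, 1, 1, [3]): A returns 0, B returns 3; on get_min_price(2, 1, 1, [3]): A raises IndexError, B raises IndexError
import Mathlib
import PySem

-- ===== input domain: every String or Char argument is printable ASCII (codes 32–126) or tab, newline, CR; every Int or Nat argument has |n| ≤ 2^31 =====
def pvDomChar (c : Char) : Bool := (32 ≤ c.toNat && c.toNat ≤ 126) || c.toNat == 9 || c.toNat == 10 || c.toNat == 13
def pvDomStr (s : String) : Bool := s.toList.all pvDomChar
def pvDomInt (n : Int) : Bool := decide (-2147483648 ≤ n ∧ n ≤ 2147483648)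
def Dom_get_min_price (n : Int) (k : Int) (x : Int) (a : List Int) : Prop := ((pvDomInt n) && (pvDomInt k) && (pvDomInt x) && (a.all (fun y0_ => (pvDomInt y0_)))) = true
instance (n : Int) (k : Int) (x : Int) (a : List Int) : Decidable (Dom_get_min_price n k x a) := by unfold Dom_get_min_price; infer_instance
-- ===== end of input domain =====

-- B replaces A's per-item discount-counter loop by a prefix-sum table plus a binary
-- search (on the sorted list) for the first discounted item dearer than x; equivalence
-- is about the return value (both Pythons sort `a` in place).

-- ===== PORT A =====
def get_min_price (n : Int) (k : Int) (x : Int) (a : List Int) : Int :=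
  let s := PySem.List.sorted a (fun v => v) false
  ((PySem.List.pyRange 0 n 1).foldl (fun (st : Int × Int) i =>
      if st.2 > 0 then (st.1 + max (PySem.List.pyGetD s i 0 - x) 0, st.2 - 1)
      else (st.1 + PySem.List.pyGetD s i 0, st.2)) (0, k)).1

-- ===== PORT B =====
-- B's hand-written `while lo < hi` binary-search loop (fuel = hi - lo bounds the
-- number of iterations; each step strictly shrinks the interval)
def pvBsearchGo (s : List Int) (x : Int) : Nat → Int → Int → Int
  | 0, lo, _ => lo
  | t + 1, lo, hi =>
    if lo < hi then
      let mid := PySem.Int.floordiv (lo + hi) 2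
      if PySem.List.pyGetD s mid 0 ≤ x then pvBsearchGo s x t (mid + 1) hi
      else pvBsearchGo s x t lo mid
    else lo

def pvBsearch (s : List Int) (x : Int) (lo hi : Int) : Int :=
  pvBsearchGo s x (hi - lo).toNat lo hi

def get_min_price_alt (n : Int) (k : Int) (x : Int) (a : List Int) : Int :=
  let s := PySem.List.sorted a (fun v => v) false
  let pre := s.foldl (fun (p : List Int) v => p ++ [PySem.List.pyGetD p (-1) 0 + v]) [0]
  let m0 := min k n
  let m := if m0 < 0 then 0 else m0
  let lo := pvBsearch s x 0 m
  PySem.List.pyGetD pre n 0 - PySem.List.pyGetD pre lo 0 - (m - lo) * x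

-- ===== PRECONDITION & SPEC =====
-- Pre_ keeps the natural domain 0 ≤ n ≤ len(a): for n > len(a) BOTH Pythons raise
-- IndexError; for negative n (a count, outside the natural domain) A's empty loop
-- happens to return 0 while B's negative prefix index wraps around.
def Pre_get_min_price (n : Int) (k : Int) (x : Int) (a : List Int) : Prop :=
  0 ≤ n ∧ n ≤ (a.length : Int)
instance (n : Int) (k : Int) (x : Int) (a : List Int) : Decidable (Pre_get_min_price n k x a) := by unfold Pre_get_min_price; infer_instance
def pvWitness_get_min_price : Int × Int × Int × List Int := (3, 2, 1, [5, 1, 3])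

def Spec_get_min_price (n : Int) (k : Int) (x : Int) (a : List Int) (out : Int) : Prop := out = get_min_price_alt n k x a
instance (n : Int) (k : Int) (x : Int) (a : List Int) (out : Int) : Decidable (Spec_get_min_price n k x a out) := by unfold Spec_get_min_price; infer_instance

-- ===== CLAIM (what is proved, stated in full; the proofs are below) =====
def Claim_equal_get_min_price : Prop := ∀ (n : Int) (k : Int) (x : Int) (a : List Int), Dom_get_min_price n k x a → Pre_get_min_price n k x a → Spec_get_min_price n k x a (get_min_price n k x a)

-- ===== LEMMAS AND PROOFS =====

-- running sums of l starting after accumulated value c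
def pvSums (c : Int) : List Int → List Int
  | [] => []
  | v :: t => (c + v) :: pvSums (c + v) t

-- B's prefix-building fold is `acc ++ running sums from acc's last element`
theorem pv_prefix_fold : ∀ (l acc : List Int), acc ≠ [] →
    l.foldl (fun (p : List Int) v => p ++ [PySem.List.pyGetD p (-1) 0 + v]) acc
      = acc ++ pvSums (PySem.List.pyGetD acc (-1) 0) l := by
  intro l
  induction l with
  | nil => intro acc _; simp [pvSums]
  | cons v t ih =>
    intro acc hacc
    simp only [List.foldl, pvSums]
    rw [ih (acc ++ [PySem.List.pyGetD acc (-1) 0 + v]) (by simp)]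
    rw [PySem.List.pyGetD_neg_one_append_singleton]
    simp

-- indexing the prefix table gives a take-sum
theorem pv_sums_getD : ∀ (l : List Int) (c : Int) (j : Nat), j ≤ l.length →
    (c :: pvSums c l).getD j 0 = c + (l.take j).sum := by
  intro l
  induction l with
  | nil =>
    intro c j hj
    have hj0 : j = 0 := Nat.le_zero.mp hj
    subst hj0
    simp [pvSums]
  | cons v t ih =>
    intro c j hj
    cases j with
    | zero => simp
    | succ j =>
      simp only [pvSums, List.getD_cons_succ, List.take_succ_cons, List.sum_cons]
      have := ih (c + v) j (by simpa using hj)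
      simpa [add_assoc] using this

-- monotonicity of indexing into a sorted (pairwise-≤) list
theorem pv_sorted_mono (s : List Int) (hpair : s.Pairwise (fun u v => u ≤ v)) :
    ∀ (i j : Int), 0 ≤ i → i ≤ j → j < (s.length : Int) →
      PySem.List.pyGetD s i 0 ≤ PySem.List.pyGetD s j 0 := by
  intro i j hi hij hj
  rw [PySem.List.pyGetD_eq_getElem s 0 hi (by omega),
      PySem.List.pyGetD_eq_getElem s 0 (by omega) hj]
  rcases eq_or_lt_of_le hij with h | h
  · subst h; exact le_refl _
  · exact List.pairwise_iff_getElem.mp hpair i.toNat j.toNat (by omega) (by omega) (by omega)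

-- binary search correctness on a sorted list (invariant-carrying, by fuel induction)
theorem pv_bsearch_go_spec (s : List Int) (hpair : s.Pairwise (fun u v => u ≤ v)) (x m : Int)
    (hml : m ≤ (s.length : Int)) :
    ∀ (t : Nat) (lo hi : Int), (hi - lo).toNat ≤ t → 0 ≤ lo → lo ≤ hi → hi ≤ m →
    (∀ i : Int, 0 ≤ i → i < lo → PySem.List.pyGetD s i 0 ≤ x) →
    (∀ i : Int, hi ≤ i → i < m → x < PySem.List.pyGetD s i 0) →
    0 ≤ pvBsearchGo s x t lo hi ∧ pvBsearchGo s x t lo hi ≤ m ∧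
    (∀ i : Int, 0 ≤ i → i < pvBsearchGo s x t lo hi → PySem.List.pyGetD s i 0 ≤ x) ∧
    (∀ i : Int, pvBsearchGo s x t lo hi ≤ i → i < m → x < PySem.List.pyGetD s i 0) := by
  intro t
  induction t with
  | zero =>
    intro lo hi ht hlo hlohi hhim hlow hhigh
    have heq : lo = hi := by omega
    simp only [pvBsearchGo]
    exact ⟨hlo, by omega, hlow, by rw [heq]; exact hhigh⟩
  | succ t ih =>
    intro lo hi ht hlo hlohi hhim hlow hhigh
    rw [pvBsearchGo]
    by_cases h : lo < hi
    · rw [if_pos h]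
      have hmidlo : lo ≤ PySem.Int.floordiv (lo + hi) 2 :=
        (PySem.Int.le_floordiv_iff_mul_le (by omega)).mpr (by omega)
      have hmidhi : PySem.Int.floordiv (lo + hi) 2 < hi :=
        (PySem.Int.floordiv_lt_iff_lt_mul (by omega)).mpr (by omega)
      set mid := PySem.Int.floordiv (lo + hi) 2 with hmid
      by_cases hc : PySem.List.pyGetD s mid 0 ≤ x
      · rw [if_pos hc]
        refine ih (mid + 1) hi (by omega) (by omega) (by omega) hhim ?_ hhigh
        intro i hi0 hilt
        exact le_trans (pv_sorted_mono s hpair i mid hi0 (by omega) (by omega)) hc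
      · rw [if_neg hc]
        refine ih lo mid (by omega) hlo (by omega) (by omega) hlow ?_
        intro i himid him
        exact lt_of_lt_of_le (lt_of_not_ge hc) (pv_sorted_mono s hpair mid i (by omega) himid (by omega))
    · rw [if_neg h]
      have heq : lo = hi := by omega
      exact ⟨hlo, by omega, hlow, by rw [heq]; exact hhigh⟩

-- sum of indexed values over range(0,t) is a take-sum
theorem pv_range_take (s : List Int) : ∀ (t : Nat),
    t ≤ s.length →
    ((PySem.List.pyRange 0 (t : Int) 1).map (fun i => PySem.List.pyGetD s i 0)).sum
      = (s.take t).sum := by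
  intro t
  induction t with
  | zero => intro _; simp [PySem.List.pyRange_one_eq_nil]
  | succ t ih =>
    intro h
    have hr : PySem.List.pyRange 0 ((t + 1 : Nat) : Int) 1
        = PySem.List.pyRange 0 (t : Int) 1 ++ [(t : Int)] := by
      push_cast
      exact PySem.List.pyRange_one_succ_right (by omega)
    rw [hr]
    rw [List.map_append, List.sum_append, ih (by omega)]
    rw [List.take_succ]
    simp only [List.map, List.sum_cons, List.sum_nil, List.sum_append]
    rw [PySem.List.pyGetD_eq_getElem s 0 (by omega) (by exact_mod_cast h)]
    simp [List.getElem?_eq_getElem (show t < s.length by omega)]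

-- invariant of A's stateful loop: price accumulated = window total minus savings
theorem pvA_loop (g : Int → Int) (x : Int) : ∀ (m : Nat) (c p k : Int),
    ((PySem.List.pyRange c (c + (m : Int)) 1).foldl (fun (st : Int × Int) i =>
        if st.2 > 0 then (st.1 + max (g i - x) 0, st.2 - 1)
        else (st.1 + g i, st.2)) (p, k)).1
    = p + ((PySem.List.pyRange c (c + (m : Int)) 1).map g).sum
        - ((PySem.List.pyRange c (c + min k (m : Int)) 1).map (fun i => min (g i) x)).sum := by
  intro m
  induction m with
  | zero =>
    intro c p k
    have h1 : PySem.List.pyRange c (c + (0 : Int)) 1 = [] :=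
      PySem.List.pyRange_one_eq_nil (by omega)
    have h2 : PySem.List.pyRange c (c + min k (0 : Int)) 1 = [] :=
      PySem.List.pyRange_one_eq_nil (by omega)
    simp [h2]
  | succ m ih =>
    intro c p k
    have hcons : PySem.List.pyRange c (c + ((m + 1 : Nat) : Int)) 1
        = c :: PySem.List.pyRange (c + 1) ((c + 1) + (m : Int)) 1 := by
      rw [PySem.List.pyRange_one_cons (by push_cast; omega)]
      congr 1
      push_cast
      ring_nf
    by_cases hk : k > 0
    · have hmin : c + min k ((m + 1 : Nat) : Int) = (c + 1) + min (k - 1) (m : Int) := by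
        push_cast; omega
      have hsav : PySem.List.pyRange c (c + min k ((m + 1 : Nat) : Int)) 1
          = c :: PySem.List.pyRange (c + 1) ((c + 1) + min (k - 1) (m : Int)) 1 := by
        rw [PySem.List.pyRange_one_cons (by push_cast; omega)]
        rw [hmin]
      rw [hcons, hsav]
      simp only [List.foldl, List.map, List.sum_cons, if_pos hk]
      rw [ih (c + 1) (p + max (g c - x) 0) (k - 1)]
      have : max (g c - x) 0 = g c - min (g c) x := by
        rcases le_total (g c) x with h | h <;> simp [h]
      omega
    · have hmin1 : PySem.List.pyRange c (c + min k ((m + 1 : Nat) : Int)) 1 = [] :=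
        PySem.List.pyRange_one_eq_nil (by omega)
      have hmin2 : PySem.List.pyRange (c + 1) ((c + 1) + min k (m : Int)) 1 = [] :=
        PySem.List.pyRange_one_eq_nil (by omega)
      rw [hcons]
      simp only [List.foldl, List.map, List.sum_cons, if_neg hk]
      rw [ih (c + 1) (p + g c) k]
      rw [hmin1, hmin2]
      simp
      omega

-- ===== VERDICT (by name: the statement is the Claim_ definition above) =====
theorem get_min_price_spec : Claim_equal_get_min_price := by
  intro n k x a _ hpre
  obtain ⟨hn0, hnl⟩ := hpre
  unfold Spec_get_min_price get_min_price get_min_price_alt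
  set s := PySem.List.sorted a (fun v => v) false with hs
  have hlen : (s.length : Int) = (a.length : Int) := by
    simp [hs, PySem.List.length_sorted]
  set g : Int → Int := fun i => PySem.List.pyGetD s i 0 with hg
  -- the clamped discount-window size
  set m : Int := if min k n < 0 then 0 else min k n with hm
  have hm0 : 0 ≤ m := by rw [hm]; split <;> omega
  have hmn : m ≤ n := by rw [hm]; split <;> omega
  have hml : m ≤ (s.length : Int) := by omega
  have hpair : s.Pairwise (fun u v => u ≤ v) := by
    simpa [hs] using PySem.List.sorted_pairwise a (fun v => v)
  -- binary search result r and its characterization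
  have hbs := pv_bsearch_go_spec s hpair x m hml ((m - 0).toNat) 0 m le_rfl le_rfl hm0 le_rfl
      (by intro i h1 h2; omega) (by intro i h1 h2; omega)
  rw [show pvBsearchGo s x ((m - 0).toNat) 0 m = pvBsearch s x 0 m from rfl] at hbs
  set r := pvBsearch s x 0 m with hr
  obtain ⟨hr0, hrm, hrlow, hrhigh⟩ := hbs
  -- prefix table values
  have hpre1 : s.foldl (fun (p : List Int) v => p ++ [PySem.List.pyGetD p (-1) 0 + v]) [0]
      = 0 :: pvSums 0 s := by
    rw [pv_prefix_fold s [0] (by simp)]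
    simp [PySem.List.pyGetD_neg_one]
  have hgetPrefix : ∀ (j : Int), 0 ≤ j → j ≤ (s.length : Int) →
      PySem.List.pyGetD (0 :: pvSums 0 s) j 0 = (s.take j.toNat).sum := by
    intro j hj0 hjl
    have : j = ((j.toNat : Nat) : Int) := by omega
    rw [this, PySem.List.pyGetD_natCast]
    rw [pv_sums_getD s 0 j.toNat (by omega)]
    simp only [Int.toNat_natCast, zero_add]
  -- A's loop value via the invariant
  have hnnat : n = ((n.toNat : Nat) : Int) := by omega
  have hA := pvA_loop g x n.toNat 0 0 k
  simp only [zero_add] at hA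
  rw [← hnnat] at hA
  rw [hA]
  -- the savings range endpoint: min k n vs the clamp m
  have hsavrange : PySem.List.pyRange 0 (min k n) 1 = PySem.List.pyRange 0 m 1 := by
    rw [hm]
    split
    · rw [PySem.List.pyRange_one_eq_nil (by omega), PySem.List.pyRange_one_eq_nil (by omega)]
    · rfl
  rw [hsavrange]
  -- split the savings at r
  have hsplit : PySem.List.pyRange 0 m 1
      = PySem.List.pyRange 0 r 1 ++ PySem.List.pyRange r m 1 :=
    PySem.List.pyRange_one_append 0 r m hr0 hrm
  have hsav : ((PySem.List.pyRange 0 m 1).map (fun i => min (g i) x)).sum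
      = ((PySem.List.pyRange 0 r 1).map g).sum + (m - r) * x := by
    rw [hsplit, List.map_append, List.sum_append]
    have h1 : (PySem.List.pyRange 0 r 1).map (fun i => min (g i) x)
        = (PySem.List.pyRange 0 r 1).map g := by
      apply List.map_congr_left
      intro i hi
      rw [PySem.List.mem_pyRange_one] at hi
      have := hrlow i hi.1 hi.2
      simp [hg] at this ⊢
      omega
    have h2 : (PySem.List.pyRange r m 1).map (fun i => min (g i) x)
        = (PySem.List.pyRange r m 1).map (fun _ => x) := by
      apply List.map_congr_left
      intro i hi
      rw [PySem.List.mem_pyRange_one] at hi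
      have := hrhigh i hi.1 hi.2
      simp [hg] at this ⊢
      omega
    rw [h1, h2]
    have h3 : ((PySem.List.pyRange r m 1).map (fun _ => x)).sum
        = ((PySem.List.pyRange r m 1).length : Int) * x := by
      rw [List.map_const']
      simp [List.sum_replicate]
    rw [h3, PySem.List.length_pyRange_one]
    have : (((m - r).toNat : Nat) : Int) = m - r := by omega
    rw [this]
  rw [hsav]
  -- range sums to take sums
  have htot : ((PySem.List.pyRange 0 n 1).map g).sum = (s.take n.toNat).sum := by
    rw [hnnat]; exact pv_range_take s n.toNat (by omega)
  have hrtake : ((PySem.List.pyRange 0 r 1).map g).sum = (s.take r.toNat).sum := by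
    have : r = ((r.toNat : Nat) : Int) := by omega
    rw [this]; exact pv_range_take s r.toNat (by omega)
  rw [htot, hrtake]
  -- evaluate B
  simp only [hpre1, ← hm]
  simp only [← hr]
  rw [hgetPrefix n hn0 (by omega), hgetPrefix r hr0 (by omega)]
  ring
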